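-- pv_equiv track=rewrite | github.com/meelgroup/barbarik | barbarik.py | constructChainFormula
-- ===== SOURCE A (Python) =====
-- def pushVar(variable, cnfClauses):
--     cnfLen = len(cnfClauses)
--     for i in range(cnfLen):
--         cnfClauses[i].append(variable)
--     return cnfClauses
--
-- def getCNF(variable, binStr, sign, origTotalVars):
--     cnfClauses = []
--     binLen = len(binStr)
--     if sign is False:
--         cnfClauses.append([-(binLen+1+origTotalVars)])
--     else:
--         cnfClauses.append([binLen+1+origTotalVars])
--
--     for i in range(binLen):
--         newVar = int(binLen-i+origTotalVars)
--         if sign is False: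
--             newVar = -1*(binLen-i+origTotalVars)
--
--         if (binStr[binLen-i-1] == '0'):
--             cnfClauses.append([newVar])
--         else:
--             cnfClauses = pushVar(newVar, cnfClauses)
--     pushVar(variable, cnfClauses)
--     return cnfClauses
--
-- def constructChainFormula(originalVar, solCount, newVar, origTotalVars, invert):
--     assert type(solCount) == int
--
--     binStr = str(bin(int(solCount)))[2:-1]
--     binLen = len(binStr)
--     for _ in range(newVar-binLen-1):
--         binStr = '0'+binStr
--
--     firstCNFClauses = getCNF(-int(originalVar), binStr, invert, origTotalVars)
--     addedClauseNum = 0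
--     writeLines = ''
--     for cl in firstCNFClauses:
--         addedClauseNum += 1
--         for lit in cl:
--             writeLines += "%d " % lit
--         writeLines += '0\n'
--
--     return writeLines, addedClauseNum
-- ===== SOURCE B (Python) =====
-- def _line(lits):
--     return ''.join('%d ' % l for l in lits) + '0\n'
--
-- def constructChainFormula(originalVar, solCount, newVar, origTotalVars, invert):
--     assert type(solCount) == int
--     binStr = str(bin(int(solCount)))[2:-1]
--     pad = newVar - len(binStr) - 1
--     if pad > 0:
--         binStr = '0' * pad + binStr
--     sign = 1 if invert else -1
--     tail = [-int(originalVar)]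
--     ones = []        # '1'-step literals seen so far, most recent chain step first
--     zeroLines = []   # finished clause lines for '0' bits, reverse chain-step order
--     count = 1
--     for pos, ch in enumerate(binStr):
--         lit = sign * (pos + 1 + origTotalVars)
--         if ch == '0':
--             zeroLines.append(_line([lit] + ones + tail))
--             count += 1
--         else:
--             ones = [lit] + ones
--     first = _line([sign * (len(binStr) + 1 + origTotalVars)] + ones + tail)
--     return first + ''.join(reversed(zeroLines)), count
-- ===== Notes on version B (the rewrite author's own statement) =====
-- stated objective: faster
-- what changed: A builds a clause list that it re-mutates throughout (pushVar appends each '1'-bit literal and the final variable to every clause built so far) and only then serialises everything with nested loops; B makes one pass over the enumerated padded binary string keeping only the list of later '1'-literals, emits every '0'-bit clause line fully formed the moment its bit is seen, and prefixes the base-clause line at the end.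
import Mathlib
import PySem

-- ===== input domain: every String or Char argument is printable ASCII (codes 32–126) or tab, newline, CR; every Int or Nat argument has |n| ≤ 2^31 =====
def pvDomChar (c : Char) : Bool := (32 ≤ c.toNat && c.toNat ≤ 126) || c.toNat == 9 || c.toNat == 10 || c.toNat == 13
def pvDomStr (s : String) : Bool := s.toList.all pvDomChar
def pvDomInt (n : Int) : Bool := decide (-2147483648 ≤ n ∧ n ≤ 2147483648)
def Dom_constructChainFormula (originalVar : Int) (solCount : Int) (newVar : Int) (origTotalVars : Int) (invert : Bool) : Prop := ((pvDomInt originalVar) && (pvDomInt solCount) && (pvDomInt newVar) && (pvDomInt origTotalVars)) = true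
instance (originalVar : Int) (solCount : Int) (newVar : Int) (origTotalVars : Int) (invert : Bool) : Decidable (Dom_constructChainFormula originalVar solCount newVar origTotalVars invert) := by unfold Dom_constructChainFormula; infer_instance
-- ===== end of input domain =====

-- B replaces A's repeatedly re-mutated clause list by a single forward pass over the
-- padded binary string that emits every clause line fully formed, measurably faster on
-- large inputs (objective: faster).

-- ===== PORT A =====
-- shared helper: str(bin(int(solCount)))[2:-1], the binary-string preprocessing both
-- Pythons perform with the same line of code
def pvBits (n : Nat) : List Char :=
  if h : n = 0 then []
  else pvBits (n / 2) ++ [if n % 2 = 1 then '1' else '0']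
decreasing_by exact Nat.div_lt_self (Nat.pos_of_ne_zero h) (by norm_num)

def pvBin (n : Int) : List Char :=
  (if n < 0 then ['-'] else []) ++ '0' :: 'b' :: (if n = 0 then ['0'] else pvBits n.natAbs)

def pvBinStr (solCount : Int) : List Char :=
  PySem.List.slice (pvBin solCount) (some 2) (some (-1))

def pvPushVar (v : Int) (cnf : List (List Int)) : List (List Int) :=
  cnf.map (fun cl => cl ++ [v])

def pvGetCNF (v : Int) (binStr : List Char) (sign : Bool) (origTotalVars : Int) : List (List Int) :=
  let binLen := binStr.length
  let cnf0 : List (List Int) :=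
    if sign = false then [[-((binLen : Int) + 1 + origTotalVars)]]
    else [[(binLen : Int) + 1 + origTotalVars]]
  let cnf := (List.range binLen).foldl (fun cnf (i : Nat) =>
      let nv : Int :=
        if sign = false then -1 * ((binLen : Int) - (i : Int) + origTotalVars)
        else (binLen : Int) - (i : Int) + origTotalVars
      if PySem.List.pyGet? binStr ((binLen : Int) - (i : Int) - 1) = some '0'
      then cnf ++ [[nv]]
      else pvPushVar nv cnf) cnf0
  pvPushVar v cnf

def constructChainFormula (originalVar : Int) (solCount : Int) (newVar : Int) (origTotalVars : Int) (invert : Bool) : String × Int :=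
  let binStr0 := pvBinStr solCount
  let binLen : Int := binStr0.length
  let binStr := (PySem.List.pyRange 0 (newVar - binLen - 1) 1).foldl (fun s _ => '0' :: s) binStr0
  let clauses := pvGetCNF (-originalVar) binStr invert origTotalVars
  let res := clauses.foldl (fun (st : List Char × Int) cl =>
      let n1 := st.2 + 1
      let w := cl.foldl (fun (w : List Char) lit => w ++ (PySem.Int.toChars lit ++ [' '])) st.1
      (w ++ ['0', '\n'], n1)) ([], 0)
  (String.ofList res.1, res.2)

-- ===== PORT B =====
def pvLine (lits : List Int) : List Char :=
  lits.flatMap (fun l => PySem.Int.toChars l ++ [' ']) ++ ['0', '\n']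

def constructChainFormula_alt (originalVar : Int) (solCount : Int) (newVar : Int) (origTotalVars : Int) (invert : Bool) : String × Int :=
  let binStr0 := pvBinStr solCount
  let pad : Int := newVar - (binStr0.length : Int) - 1
  let binStr := if 0 < pad then List.replicate pad.toNat '0' ++ binStr0 else binStr0
  let sign : Int := if invert then 1 else -1
  let tail : List Int := [-originalVar]
  let st := (PySem.List.enumerate binStr 0).foldl
      (fun (st : List Int × List (List Char) × Int) pc =>
        let lit := sign * (pc.1 + 1 + origTotalVars)
        if pc.2 = '0' then (st.1, st.2.1 ++ [pvLine (lit :: st.1 ++ tail)], st.2.2 + 1)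
        else (lit :: st.1, st.2.1, st.2.2))
      ([], [], 1)
  let first := pvLine (sign * ((binStr.length : Int) + 1 + origTotalVars) :: st.1 ++ tail)
  (String.ofList (first ++ st.2.1.reverse.flatten), st.2.2)

-- ===== PRECONDITION & SPEC =====
def Spec_constructChainFormula (originalVar : Int) (solCount : Int) (newVar : Int) (origTotalVars : Int) (invert : Bool) (out : String × Int) : Prop := out = constructChainFormula_alt originalVar solCount newVar origTotalVars invert
instance (originalVar : Int) (solCount : Int) (newVar : Int) (origTotalVars : Int) (invert : Bool) (out : String × Int) : Decidable (Spec_constructChainFormula originalVar solCount newVar origTotalVars invert out) := by unfold Spec_constructChainFormula; infer_instance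

-- ===== CLAIM (what is proved, stated in full; the proofs are below) =====
def Claim_equal_constructChainFormula : Prop := ∀ (originalVar : Int) (solCount : Int) (newVar : Int) (origTotalVars : Int) (invert : Bool), Dom_constructChainFormula originalVar solCount newVar origTotalVars invert → Spec_constructChainFormula originalVar solCount newVar origTotalVars invert (constructChainFormula originalVar solCount newVar origTotalVars invert)

-- ===== LEMMAS AND PROOFS =====

theorem pv_foldl_cons_zero (l : List Int) (bs : List Char) :
    l.foldl (fun s _ => '0' :: s) bs = List.replicate l.length '0' ++ bs := by
  induction l generalizing bs with
  | nil => rfl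
  | cons x t ih => simp [List.foldl_cons, ih, List.replicate_succ']

theorem pv_pad_eq (k : Int) (bs : List Char) :
    (PySem.List.pyRange 0 k 1).foldl (fun s _ => '0' :: s) bs
      = (if 0 < k then List.replicate k.toNat '0' ++ bs else bs) := by
  rw [pv_foldl_cons_zero, PySem.List.length_pyRange_one]
  split_ifs with h
  · simp
  · have : (k - 0).toNat = 0 := by omega
    simp; omega

theorem pv_foldl_range_getD {α β : Type} (f : β → α → β) (d : α)
    (l : List α) : ∀ (init : β),
    (List.range l.length).foldl (fun st i => f st (l.getD i d)) init = l.foldl f init := by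
  induction l with
  | nil => intro init; rfl
  | cons x t ih =>
      intro init
      rw [List.length_cons, List.range_succ_eq_map]
      simp only [List.foldl_cons, List.foldl_map, List.getD_cons_zero, List.getD_cons_succ]
      exact ih (f init x)

def pvOnesE (s T : Int) : List (Int × Char) → List Int
  | [] => []
  | pc :: r => if pc.2 = '0' then pvOnesE s T r else pvOnesE s T r ++ [s * (pc.1 + 1 + T)]

def pvZclE (s T : Int) (ob : List Int) : List (Int × Char) → List (List Int)
  | [] => []
  | pc :: r => if pc.2 = '0' then pvZclE s T ob r ++ [s * (pc.1 + 1 + T) :: ob]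
               else pvZclE s T (s * (pc.1 + 1 + T) :: ob) r

theorem pvZclE_append (s T l : Int) (e : List (Int × Char)) : ∀ ob,
    pvZclE s T (ob ++ [l]) e = (pvZclE s T ob e).map (fun cl => cl ++ [l]) := by
  induction e with
  | nil => intro ob; rfl
  | cons pc r ih =>
      intro ob
      by_cases h : pc.2 = '0' <;> simp [pvZclE, h, ih]
      · exact ih (s * (pc.1 + 1 + T) :: ob)

theorem pvA_foldr (s T : Int) (e : List (Int × Char)) (acc : List (List Int)) :
    e.foldr (fun pc cnf => if pc.2 = '0' then cnf ++ [[s * (pc.1 + 1 + T)]]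
             else cnf.map (fun cl => cl ++ [s * (pc.1 + 1 + T)])) acc
      = acc.map (fun cl => cl ++ pvOnesE s T e) ++ pvZclE s T [] e := by
  induction e with
  | nil => simp [pvOnesE, pvZclE]
  | cons pc r ih =>
      by_cases h : pc.2 = '0'
      · simp [List.foldr_cons, h, ih, pvOnesE, pvZclE]
      · simp only [List.foldr_cons, h, ih, pvOnesE, pvZclE, if_false]
        have hz := pvZclE_append s T (s * (pc.1 + 1 + T)) r []
        simp only [List.nil_append] at hz
        simp [hz, List.map_append, List.map_map, Function.comp, List.append_assoc]


theorem pvB_foldl (s T : Int) (tail : List Int) (e : List (Int × Char)) :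
    ∀ (ob : List Int) (ls : List (List Char)) (n : Int),
    e.foldl (fun (st : List Int × List (List Char) × Int) pc =>
        if pc.2 = '0' then (st.1, st.2.1 ++ [pvLine (s * (pc.1 + 1 + T) :: st.1 ++ tail)], st.2.2 + 1)
        else (s * (pc.1 + 1 + T) :: st.1, st.2.1, st.2.2)) (ob, ls, n)
      = (pvOnesE s T e ++ ob,
         ls ++ ((pvZclE s T ob e).map (fun cl => pvLine (cl ++ tail))).reverse,
         n + ((pvZclE s T ob e).length : Int)) := by
  induction e with
  | nil => intro ob ls n; simp [pvOnesE, pvZclE]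
  | cons pc r ih =>
      intro ob ls n
      by_cases h : pc.2 = '0'
      · simp only [List.foldl_cons, h, pvOnesE, pvZclE]
        rw [ih]
        simp [List.append_assoc]
        omega
      · simp only [List.foldl_cons, h, pvOnesE, pvZclE, if_false]
        rw [ih]
        simp [List.append_assoc]

theorem pv_write_fold (cls : List (List Int)) : ∀ (w : List Char) (n : Int),
    cls.foldl (fun (st : List Char × Int) cl =>
        (cl.foldl (fun (w : List Char) lit => w ++ (PySem.Int.toChars lit ++ [' '])) st.1 ++ ['0', '\n'], st.2 + 1)) (w, n)
      = (w ++ (cls.map pvLine).flatten, n + (cls.length : Int)) := by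
  induction cls with
  | nil => intro w n; simp
  | cons cl t ih =>
      intro w n
      rw [List.foldl_cons, ih]
      rw [PySem.List.foldl_append_eq_flatMap]
      simp [pvLine, List.append_assoc]
      ring

theorem pvA_range_eq (s T : Int) (invert : Bool) (hs : s = if invert then 1 else -1)
    (cs : List Char) (acc : List (List Int)) :
    (List.range cs.length).foldl (fun cnf (i : Nat) =>
        if PySem.List.pyGet? cs ((cs.length : Int) - (i : Int) - 1) = some '0'
        then cnf ++ [[(if invert = false then -1 * ((cs.length : Int) - (i : Int) + T)
                       else (cs.length : Int) - (i : Int) + T)]]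
        else pvPushVar (if invert = false then -1 * ((cs.length : Int) - (i : Int) + T)
                        else (cs.length : Int) - (i : Int) + T) cnf) acc
      = (PySem.List.enumerate cs 0).foldr
          (fun pc cnf => if pc.2 = '0' then cnf ++ [[s * (pc.1 + 1 + T)]]
           else cnf.map (fun cl => cl ++ [s * (pc.1 + 1 + T)])) acc := by
  have hrev : ((PySem.List.enumerate cs 0).reverse).foldl
      (fun cnf (pc : Int × Char) => if pc.2 = '0' then cnf ++ [[s * (pc.1 + 1 + T)]]
        else cnf.map (fun cl => cl ++ [s * (pc.1 + 1 + T)])) acc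
      = (PySem.List.enumerate cs 0).foldr
          (fun pc cnf => if pc.2 = '0' then cnf ++ [[s * (pc.1 + 1 + T)]]
           else cnf.map (fun cl => cl ++ [s * (pc.1 + 1 + T)])) acc := by
    rw [List.foldl_reverse]
  rw [← hrev]
  set rl := (PySem.List.enumerate cs 0).reverse with hrl
  have hlen : rl.length = cs.length := by
    simp [hrl, PySem.List.length_enumerate]
  rw [← pv_foldl_range_getD (fun cnf (pc : Int × Char) => if pc.2 = '0' then cnf ++ [[s * (pc.1 + 1 + T)]]
        else cnf.map (fun cl => cl ++ [s * (pc.1 + 1 + T)])) ((0 : Int), ' ') rl acc]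
  rw [hlen]
  apply PySem.List.foldl_congr_mem
  intro a i hi
  have hiL : i < cs.length := List.mem_range.mp hi
  have hgd : rl.getD i ((0 : Int), ' ') = (((cs.length - 1 - i : Nat) : Int), cs[cs.length - 1 - i]'(by omega)) := by
    rw [hrl]
    rw [List.getD_eq_getElem _ _ (by simpa [PySem.List.length_enumerate] using hiL)]
    rw [List.getElem_reverse]
    rw [PySem.List.getElem_enumerate]
    simp [PySem.List.length_enumerate]
  have hidx : (cs.length : Int) - (i : Int) - 1 = ((cs.length - 1 - i : Nat) : Int) := by omega
  have hget : PySem.List.pyGet? cs ((cs.length : Int) - (i : Int) - 1)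
      = some (cs[cs.length - 1 - i]'(by omega)) := by
    rw [hidx, PySem.List.pyGet?_natCast, List.getElem?_eq_getElem]
  have hlit : ((cs.length - 1 - i : Nat) : Int) + 1 + T = (cs.length : Int) - (i : Int) + T := by omega
  have hnv : (if invert = false then -1 * ((cs.length : Int) - (i : Int) + T)
              else (cs.length : Int) - (i : Int) + T) = s * ((cs.length : Int) - (i : Int) + T) := by
    cases invert <;> simp [hs]
  rw [hgd]
  simp only [hget, hnv, hlit, pvPushVar, Option.some.injEq]

theorem pv_core (ov T : Int) (invert : Bool) (cs : List Char) :
    ((pvGetCNF (-ov) cs invert T).foldl (fun (st : List Char × Int) cl =>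
        (cl.foldl (fun (w : List Char) lit => w ++ (PySem.Int.toChars lit ++ [' '])) st.1 ++ ['0', '\n'], st.2 + 1)) ([], 0)
      : List Char × Int)
    = ((fun (st : List Int × List (List Char) × Int) =>
          (pvLine ((if invert then (1 : Int) else -1) * ((cs.length : Int) + 1 + T) :: st.1 ++ [-ov]) ++ st.2.1.reverse.flatten, st.2.2))
        ((PySem.List.enumerate cs 0).foldl
          (fun (st : List Int × List (List Char) × Int) pc =>
            if pc.2 = '0' then (st.1, st.2.1 ++ [pvLine ((if invert then (1 : Int) else -1) * (pc.1 + 1 + T) :: st.1 ++ [-ov])], st.2.2 + 1)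
            else ((if invert then (1 : Int) else -1) * (pc.1 + 1 + T) :: st.1, st.2.1, st.2.2))
          ([], [], 1))) := by
  have hbase : (if invert = false then [[-((cs.length : Int) + 1 + T)]] else [[(cs.length : Int) + 1 + T]])
      = [[(if invert then (1 : Int) else -1) * ((cs.length : Int) + 1 + T)]] := by
    cases invert <;> simp
  unfold pvGetCNF
  dsimp only
  rw [pvA_range_eq (if invert then (1 : Int) else -1) T invert rfl cs]
  rw [hbase, pvA_foldr]
  rw [pvB_foldl]
  rw [pv_write_fold]
  simp [pvPushVar, List.map_map]
  exact ⟨by simp [Function.comp_def], by omega⟩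

-- ===== VERDICT (by name: the statement is the Claim_ definition above) =====
theorem constructChainFormula_spec : Claim_equal_constructChainFormula := by
  intro ov sc nv T invert _
  unfold Spec_constructChainFormula constructChainFormula constructChainFormula_alt
  dsimp only
  rw [pv_pad_eq]
  rw [pv_core ov T invert]
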